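-- pv_equiv track=rewrite | github.com/ericmak211/Code-Smells-Analysis-Tool | check_refactoring_check.py | select_main_python_file
-- ===== SOURCE A (Python) =====
-- def select_main_python_file(python_files):
--     # Heuristic to prioritize certain files
--     priority_files = ['main.py', 'app.py']
--     for priority_file in priority_files:
--         for file in python_files:
--             if file.endswith(priority_file):
--                 return file
--     # If no priority file is found, return the first Python file found
--     if python_files:
--         return python_files[0]
--     return None
-- ===== SOURCE B (Python) =====
-- def select_main_python_file(python_files):
--     # Single pass keeping the first 'main.py' and first 'app.py' candidates.
--     first_main = None
--     first_app = None
--     for file in python_files: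
--         if first_main is None and file.endswith('main.py'):
--             first_main = file
--         if first_app is None and file.endswith('app.py'):
--             first_app = file
--     if first_main is not None:
--         return first_main
--     if first_app is not None:
--         return first_app
--     if python_files:
--         return python_files[0]
--     return None
-- ===== Notes on version B (the rewrite author's own statement) =====
-- stated objective: alternative
-- what changed: Replaced the priority-outer double scan (one full pass per priority suffix) with a single pass over the list that records the first 'main.py' and first 'app.py' candidates and chooses between them afterwards.
import Mathlib
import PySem

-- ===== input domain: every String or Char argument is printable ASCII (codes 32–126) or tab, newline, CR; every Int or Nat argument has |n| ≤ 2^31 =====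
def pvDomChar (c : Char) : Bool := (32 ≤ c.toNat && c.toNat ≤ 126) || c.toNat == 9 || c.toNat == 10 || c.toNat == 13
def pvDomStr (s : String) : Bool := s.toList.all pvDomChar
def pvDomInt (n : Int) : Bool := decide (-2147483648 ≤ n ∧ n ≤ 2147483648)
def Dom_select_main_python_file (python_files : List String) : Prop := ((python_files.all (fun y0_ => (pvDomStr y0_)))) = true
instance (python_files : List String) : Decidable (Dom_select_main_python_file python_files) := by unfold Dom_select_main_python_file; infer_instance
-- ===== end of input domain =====

-- B replaces A's per-priority double scan with one pass recording the first 'main.py' and first 'app.py' candidates (objective: alternative decomposition, same cost).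


-- ===== PORT A =====
def findEnds (p : String) (xs : List String) : Option String :=
  match xs with
  | [] => none
  | f :: rest => if PySem.Str.endswith f p then some f else findEnds p rest

-- outer loop over priority_files, inner scan in findEnds (A's nested loops)
def loopA (prios : List String) (python_files : List String) : Option String :=
  match prios with
  | [] => none
  | p :: rest =>
    match findEnds p python_files with
    | some f => some f
    | none => loopA rest python_files

def select_main_python_file (python_files : List String) : Option String :=
  match loopA ["main.py", "app.py"] python_files with
  | some f => some f
  | none =>
    match python_files with
    | [] => none
    | f :: _ => some f

-- ===== PORT B =====
-- single pass keeping the first main.py and first app.py candidates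
def loopB (xs : List String) (fm fa : Option String) : Option String × Option String :=
  match xs with
  | [] => (fm, fa)
  | f :: rest =>
    let fm' := if fm.isNone && PySem.Str.endswith f "main.py" then some f else fm
    let fa' := if fa.isNone && PySem.Str.endswith f "app.py" then some f else fa
    loopB rest fm' fa'

def select_main_python_file_alt (python_files : List String) : Option String :=
  match loopB python_files none none with
  | (some m, _) => some m
  | (none, some a) => some a
  | (none, none) =>
    match python_files with
    | [] => none
    | f :: _ => some f

-- ===== PRECONDITION & SPEC =====
def Spec_select_main_python_file (python_files : List String) (out : Option String) : Prop := out = select_main_python_file_alt python_files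
instance (python_files : List String) (out : Option String) : Decidable (Spec_select_main_python_file python_files out) := by unfold Spec_select_main_python_file; infer_instance

-- ===== CLAIM (what is proved, stated in full; the proofs are below) =====
def Claim_equal_select_main_python_file : Prop := ∀ (python_files : List String), Dom_select_main_python_file python_files → Spec_select_main_python_file python_files (select_main_python_file python_files)

-- ===== LEMMAS AND PROOFS =====
theorem loopB_eq (xs : List String) (fm fa : Option String) :
    loopB xs fm fa =
      ((match fm with | some m => some m | none => findEnds "main.py" xs),
       (match fa with | some a => some a | none => findEnds "app.py" xs)) := by
  induction xs generalizing fm fa with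
  | nil => cases fm <;> cases fa <;> simp [loopB, findEnds]
  | cons f rest ih =>
    cases fm <;> cases fa <;>
      simp only [loopB, Option.isNone, Bool.true_and, Bool.false_and, findEnds, ih] <;>
      split_ifs <;> simp_all


-- ===== VERDICT (by name: the statement is the Claim_ definition above) =====
theorem select_main_python_file_spec : Claim_equal_select_main_python_file := by
  intro xs _
  unfold Spec_select_main_python_file select_main_python_file select_main_python_file_alt loopA
  rw [loopB_eq]
  cases h1 : findEnds "main.py" xs <;> cases h2 : findEnds "app.py" xs <;>
    simp [loopA, h1, h2] <;> cases xs <;> simp
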